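-- pv_equiv track=rewrite | github.com/kesslwovv/menger-4d | slicemap_generator.py | is_in_sponge
-- ===== SOURCE A (Python) =====
-- ITER = 3
--
-- def is_in_sponge(x, y, z, w):
--     for i in (range(ITER)):
--         div = 3 ** i
--         local_x = (x // div) % 3
--         local_y = (y // div) % 3
--         local_z = (z // div) % 3
--         local_w = (w // div) % 3
--
--         # rule for menger sponge
--         # you could also use lookup table
--         # use different values for comparison to get more enclosed values
--         # use `> 2` for the "tight" menger sponge (with "face central" hypercubes)
--         if [local_x, local_y, local_z, local_w].count(1) > 1:
--             return 0
--
--     return 1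
-- ===== SOURCE B (Python) =====
-- ITER = 3
--
-- def is_in_sponge(x, y, z, w):
--     # recursive descent over the scale level instead of a for-loop
--     def check(i):
--         if i == ITER:
--             return 1
--         div = 3 ** i
--         if sum(c // div % 3 == 1 for c in (x, y, z, w)) > 1:
--             return 0
--         return check(i + 1)
--     return check(0)
-- ===== Notes on version B (the rewrite author's own statement) =====
-- stated objective: alternative
-- what changed: Replaces the for-loop with early return by a recursive helper over the scale level that sums boolean digit tests instead of building a list and counting.
import Mathlib
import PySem

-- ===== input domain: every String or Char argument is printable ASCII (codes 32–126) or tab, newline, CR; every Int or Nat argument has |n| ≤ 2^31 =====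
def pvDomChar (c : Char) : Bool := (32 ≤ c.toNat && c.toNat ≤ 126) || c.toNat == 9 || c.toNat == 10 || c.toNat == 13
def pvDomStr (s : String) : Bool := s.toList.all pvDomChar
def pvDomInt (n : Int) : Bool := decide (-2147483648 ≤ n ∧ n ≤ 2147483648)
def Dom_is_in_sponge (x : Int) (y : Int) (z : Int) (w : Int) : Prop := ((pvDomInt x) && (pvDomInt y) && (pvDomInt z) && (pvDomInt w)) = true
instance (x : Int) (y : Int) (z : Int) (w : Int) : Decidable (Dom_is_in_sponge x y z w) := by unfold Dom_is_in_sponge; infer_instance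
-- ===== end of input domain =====

-- B replaces A's for-loop-with-early-return by a recursive helper over the scale level,
-- summing boolean digit tests instead of building a list and counting (objective: alternative).

-- ===== PORT A =====
-- the for-loop with early `return 0`; iterates over range(ITER) with ITER = 3
def spongeLoopA (x : Int) (y : Int) (z : Int) (w : Int) : List Int → Int
  | [] => 1
  | i :: rest =>
    let div : Int := 3 ^ i.toNat  -- 3 ** i; i ∈ range(ITER) is nonnegative, so toNat is exact
    let local_x := PySem.Int.mod (PySem.Int.floordiv x div) 3
    let local_y := PySem.Int.mod (PySem.Int.floordiv y div) 3
    let local_z := PySem.Int.mod (PySem.Int.floordiv z div) 3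
    let local_w := PySem.Int.mod (PySem.Int.floordiv w div) 3
    if PySem.List.count [local_x, local_y, local_z, local_w] 1 > 1 then 0
    else spongeLoopA x y z w rest

def is_in_sponge (x : Int) (y : Int) (z : Int) (w : Int) : Int :=
  spongeLoopA x y z w (PySem.List.pyRange 0 3 1)

-- ===== PORT B =====
-- recursive check(i); Python tests `i == ITER`, ported as `3 ≤ i` (equivalent: check is
-- only ever called with i ≤ ITER) so that the recursion terminates on fuel 3 - i
def altCheck (x : Int) (y : Int) (z : Int) (w : Int) (i : Nat) : Int :=
  if 3 ≤ i then 1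
  else
    let div : Int := 3 ^ i
    let cnt : Int :=
      (if PySem.Int.mod (PySem.Int.floordiv x div) 3 = 1 then 1 else 0) +
      (if PySem.Int.mod (PySem.Int.floordiv y div) 3 = 1 then 1 else 0) +
      (if PySem.Int.mod (PySem.Int.floordiv z div) 3 = 1 then 1 else 0) +
      (if PySem.Int.mod (PySem.Int.floordiv w div) 3 = 1 then 1 else 0)
    if cnt > 1 then 0 else altCheck x y z w (i + 1)
termination_by 3 - i

def is_in_sponge_alt (x : Int) (y : Int) (z : Int) (w : Int) : Int :=
  altCheck x y z w 0

-- ===== PRECONDITION & SPEC =====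
def Spec_is_in_sponge (x : Int) (y : Int) (z : Int) (w : Int) (out : Int) : Prop := out = is_in_sponge_alt x y z w
instance (x : Int) (y : Int) (z : Int) (w : Int) (out : Int) : Decidable (Spec_is_in_sponge x y z w out) := by unfold Spec_is_in_sponge; infer_instance

-- ===== CLAIM (what is proved, stated in full; the proofs are below) =====
def Claim_equal_is_in_sponge : Prop := ∀ (x : Int) (y : Int) (z : Int) (w : Int), Dom_is_in_sponge x y z w → Spec_is_in_sponge x y z w (is_in_sponge x y z w)

-- ===== LEMMAS AND PROOFS =====

-- A's list.count(1) > 1 coincides with B's sum of boolean tests > 1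
theorem cond_eq (a b c d : Int) :
    (1 < List.count 1 [a, b, c, d]) ↔
    (1 < (if a = 1 then (1:Int) else 0) + (if b = 1 then 1 else 0) +
         (if c = 1 then 1 else 0) + (if d = 1 then 1 else 0)) := by
  by_cases ha : a = 1 <;> by_cases hb : b = 1 <;> by_cases hc : c = 1 <;> by_cases hd : d = 1 <;>
    simp [ha, hb, hc, hd]

-- ===== VERDICT (by name: the statement is the Claim_ definition above) =====
theorem is_in_sponge_spec : Claim_equal_is_in_sponge := by
  intro x y z w _
  unfold Spec_is_in_sponge is_in_sponge is_in_sponge_alt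
  have hr : PySem.List.pyRange 0 3 1 = [0, 1, 2] := by decide
  rw [hr, altCheck, altCheck, altCheck, altCheck]
  simp only [spongeLoopA]
  norm_num [cond_eq, show ((3:Int) ^ Int.toNat 2) = 9 from by decide]
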